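-- pv_equiv track=rewrite | github.com/jonezmedia219-sketch/agent-api-stack | app/services/extract_page/service.py | _pick_important_links
-- ===== SOURCE A (Python) =====
-- _IMPORTANT_LINK_TOKENS = ("contact", "about", "pricing", "team", "careers")
--
-- def _pick_important_links(links: list[dict]) -> list[str]:
--     matches: list[str] = []
--     for link in links:
--         href = str(link.get("href", "")).strip()
--         text = str(link.get("text", "")).strip().lower()
--         lower_href = href.lower()
--         if any(token in text or token in lower_href for token in _IMPORTANT_LINK_TOKENS):
--             matches.append(href)
--     seen = []
--     for item in matches:
--         if item and item not in seen:
--             seen.append(item)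
--     return seen[:10]
-- ===== SOURCE B (Python) =====
-- _IMPORTANT_LINK_TOKENS = ("contact", "about", "pricing", "team", "careers")
--
-- def _pick_important_links(links):
--     result: list[str] = []
--     for link in links:
--         if len(result) == 10:
--             break
--         href = str(link.get("href", "")).strip()
--         text = str(link.get("text", "")).strip().lower()
--         lower_href = href.lower()
--         if href and href not in result and any(
--             token in text or token in lower_href for token in _IMPORTANT_LINK_TOKENS
--         ):
--             result.append(href)
--     return result
-- ===== Notes on version B (the rewrite author's own statement) =====
-- stated objective: simpler
-- what changed: A's three passes (filter all links into matches, then dedup non-empty matches into seen, then slice seen[:10]) are collapsed into one loop that appends directly to the result and breaks as soon as 10 links are collected.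
import Mathlib
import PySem

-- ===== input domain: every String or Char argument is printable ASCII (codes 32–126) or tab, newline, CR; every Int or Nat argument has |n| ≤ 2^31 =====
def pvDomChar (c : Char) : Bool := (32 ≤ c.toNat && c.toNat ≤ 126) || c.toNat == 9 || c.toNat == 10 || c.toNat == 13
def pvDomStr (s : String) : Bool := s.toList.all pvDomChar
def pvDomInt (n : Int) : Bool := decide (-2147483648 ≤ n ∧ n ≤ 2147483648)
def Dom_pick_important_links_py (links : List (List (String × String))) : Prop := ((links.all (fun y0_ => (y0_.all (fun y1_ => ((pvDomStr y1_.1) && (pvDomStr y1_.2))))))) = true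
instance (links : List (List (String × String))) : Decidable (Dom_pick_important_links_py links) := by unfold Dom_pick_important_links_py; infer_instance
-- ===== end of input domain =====

-- B collapses A's three passes (filter, dedup, slice[:10]) into one loop with an early break at 10; objective: simpler.

-- shared per-link computations (identical in both Pythons)
def pvTokens : List String := ["contact", "about", "pricing", "team", "careers"]

def pvHref (link : List (String × String)) : String :=
  PySem.Str.strip ((PySem.Dict.mk link).getD "href" "")

def pvMatch (link : List (String × String)) : Bool :=
  let href := pvHref link
  let text := PySem.Str.lower (PySem.Str.strip ((PySem.Dict.mk link).getD "text" ""))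
  let lower_href := PySem.Str.lower href
  pvTokens.any (fun token => PySem.Str.isIn token text || PySem.Str.isIn token lower_href)

-- ===== PORT A =====
def pick_important_links_py (links : List (List (String × String))) : List String :=
  let ms := links.foldl (fun ms link =>
    if pvMatch link then ms ++ [pvHref link] else ms) []
  let seen := ms.foldl (fun seen item =>
    if !(item == "") && !(seen.contains item) then seen ++ [item] else seen) []
  PySem.List.slice seen none (some 10)

-- ===== PORT B =====
def pvAltLoop : List (List (String × String)) → List String → List String
  | [], result => result
  | link :: rest, result =>
    if result.length == 10 then result
    else
      let href := pvHref link
      if !(href == "") && !(result.contains href) && pvMatch link then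
        pvAltLoop rest (result ++ [href])
      else
        pvAltLoop rest result

def pick_important_links_py_alt (links : List (List (String × String))) : List String :=
  pvAltLoop links []

-- ===== PRECONDITION & SPEC =====
def Spec_pick_important_links_py (links : List (List (String × String))) (out : List String) : Prop := out = pick_important_links_py_alt links
instance (links : List (List (String × String))) (out : List String) : Decidable (Spec_pick_important_links_py links out) := by unfold Spec_pick_important_links_py; infer_instance

-- ===== CLAIM (what is proved, stated in full; the proofs are below) =====
def Claim_equal_pick_important_links_py : Prop := ∀ (links : List (List (String × String))), Dom_pick_important_links_py links → Spec_pick_important_links_py links (pick_important_links_py links)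

-- ===== LEMMAS AND PROOFS =====

-- A's two step functions and the fused one-pass step (filter + dedup in one fold)
def pvDStep (seen : List String) (item : String) : List String :=
  if !(item == "") && !(seen.contains item) then seen ++ [item] else seen

def pvFStep (acc : List String) (link : List (String × String)) : List String :=
  if !(pvHref link == "") && !(acc.contains (pvHref link)) && pvMatch link then
    acc ++ [pvHref link]
  else acc

theorem pvDStep_fstep (acc : List String) (l : List (String × String))
    (hm : pvMatch l = true) : pvDStep acc (pvHref l) = pvFStep acc l := by
  unfold pvDStep pvFStep
  rw [hm, Bool.and_true]

-- A's dedup loop applied after its filter loop is the fused fold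
theorem pvFuse (links : List (List (String × String))) (ms acc : List String) :
    (links.foldl (fun ms link => if pvMatch link then ms ++ [pvHref link] else ms) ms).foldl
      pvDStep acc
    = links.foldl pvFStep (ms.foldl pvDStep acc) := by
  induction links generalizing ms with
  | nil => rfl
  | cons l ls ih =>
    have harg : List.foldl pvDStep acc (if pvMatch l then ms ++ [pvHref l] else ms)
        = pvFStep (List.foldl pvDStep acc ms) l := by
      by_cases hm : pvMatch l = true
      · rw [if_pos hm, List.foldl_append, List.foldl_cons, List.foldl_nil,
          pvDStep_fstep _ _ hm]
      · rw [if_neg hm]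
        have hfalse : (!(pvHref l == "") &&
            !((ms.foldl pvDStep acc).contains (pvHref l)) && pvMatch l) = false := by
          rw [Bool.not_eq_true] at hm
          rw [hm, Bool.and_false]
        unfold pvFStep
        rw [hfalse]
        rfl
    simp only [List.foldl_cons]
    rw [ih, harg]

-- the fused fold only appends
theorem pvFStep_prefix (links : List (List (String × String))) (acc : List String) :
    ∃ t, links.foldl pvFStep acc = acc ++ t := by
  induction links generalizing acc with
  | nil => exact ⟨[], by simp⟩
  | cons l ls ih =>
    simp only [List.foldl_cons, pvFStep]
    split
    · obtain ⟨t, ht⟩ := ih (acc ++ [pvHref l])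
      exact ⟨[pvHref l] ++ t, by simpa using ht⟩
    · exact ih acc

-- B's loop computes take 10 of the fused fold
theorem pvAltLoop_eq (links : List (List (String × String))) (res : List String)
    (h : res.length ≤ 10) :
    pvAltLoop links res = (links.foldl pvFStep res).take 10 := by
  induction links generalizing res with
  | nil => simp [pvAltLoop, List.take_of_length_le h]
  | cons l ls ih =>
    simp only [pvAltLoop, List.foldl_cons]
    by_cases h10 : res.length = 10
    · simp only [h10]
      obtain ⟨t, ht⟩ := pvFStep_prefix ls (pvFStep res l)
      have hpre : ∃ u, pvFStep res l = res ++ u := by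
        unfold pvFStep; split
        · exact ⟨[pvHref l], rfl⟩
        · exact ⟨[], by simp⟩
      obtain ⟨u, hu⟩ := hpre
      rw [ht, hu]
      simp [h10]
    · have hne : (res.length == 10) = false := by simp [h10]
      simp only [hne, Bool.false_eq_true, if_false]
      have hlt : res.length < 10 := lt_of_le_of_ne h h10
      by_cases hc : (!(pvHref l == "") && !(res.contains (pvHref l)) && pvMatch l) = true
      · have hf : pvFStep res l = res ++ [pvHref l] := by unfold pvFStep; rw [if_pos hc]
        rw [if_pos hc, hf]
        exact ih _ (by simp; omega)
      · have hf : pvFStep res l = res := by unfold pvFStep; rw [if_neg hc]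
        rw [if_neg hc, hf]
        exact ih _ h

-- ===== VERDICT (by name: the statement is the Claim_ definition above) =====
theorem pick_important_links_py_spec : Claim_equal_pick_important_links_py := by
  intro links _
  show pick_important_links_py links = pick_important_links_py_alt links
  unfold pick_important_links_py pick_important_links_py_alt
  rw [pvAltLoop_eq links [] (by simp)]
  show PySem.List.slice ((links.foldl _ []).foldl pvDStep []) none (some 10) = _
  rw [pvFuse links [] []]
  rw [show ((10 : Int)) = ((10 : Nat) : Int) from rfl, PySem.List.slice_to_natCast]
  rfl
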